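-- pv_equiv track=rewrite | github.com/kkemizinha/CodeSignal_Solutions | Arcade/Intro/05-shapeArea.py | shapeArea
-- ===== SOURCE A (Python) =====
-- def shapeArea(n):
--     if (n == 0) or (n < 0):
--         return 0
--     if n == 1:
--         return 1
--     sum_value = 0
--     for i in range(1,n):
--         sum_value += i
--     return (4*sum_value + 1)
-- ===== SOURCE B (Python) =====
-- def shapeArea(n):
--     if n <= 0:
--         return 0
--     return 2*n*n - 2*n + 1
-- ===== Notes on version B (the rewrite author's own statement) =====
-- stated objective: faster
-- what changed: replaced the O(n) summation loop by the closed-form 2n^2-2n+1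
import Mathlib
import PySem

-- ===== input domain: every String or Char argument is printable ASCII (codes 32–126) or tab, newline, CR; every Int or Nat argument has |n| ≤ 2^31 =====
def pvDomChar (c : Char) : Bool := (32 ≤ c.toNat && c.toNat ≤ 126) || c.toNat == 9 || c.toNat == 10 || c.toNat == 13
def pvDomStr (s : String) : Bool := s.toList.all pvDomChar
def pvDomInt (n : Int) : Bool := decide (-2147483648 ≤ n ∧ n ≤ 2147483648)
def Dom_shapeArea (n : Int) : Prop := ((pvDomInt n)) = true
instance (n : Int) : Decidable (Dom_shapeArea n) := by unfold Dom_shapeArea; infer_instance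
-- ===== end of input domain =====

-- B replaces A's O(n) summation loop by the closed form 2n^2-2n+1 (faster).


-- ===== PORT A =====
def shapeArea (n : Int) : Int :=
  if n = 0 ∨ n < 0 then 0
  else if n = 1 then 1
  else
    let sum_value : Int := (PySem.List.pyRange 1 n 1).foldl (fun acc i => acc + i) 0
    4 * sum_value + 1

-- ===== PORT B =====
def shapeArea_alt (n : Int) : Int :=
  if n ≤ 0 then 0
  else 2 * n * n - 2 * n + 1

-- ===== PRECONDITION & SPEC =====
def Spec_shapeArea (n : Int) (out : Int) : Prop := out = shapeArea_alt n
instance (n : Int) (out : Int) : Decidable (Spec_shapeArea n out) := by unfold Spec_shapeArea; infer_instance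

-- ===== CLAIM (what is proved, stated in full; the proofs are below) =====
def Claim_equal_shapeArea : Prop := ∀ (n : Int), Dom_shapeArea n → Spec_shapeArea n (shapeArea n)

-- ===== LEMMAS AND PROOFS =====

-- sum of range(1, 1+m) doubled is m*(m+1)
theorem pvSumRange (m : Nat) :
    (PySem.List.pyRange 1 (1 + (m : Int)) 1).foldl (fun acc i => acc + i) 0 * 2
      = (m : Int) * ((m : Int) + 1) := by
  induction m with
  | zero => simp [PySem.List.pyRange_one_eq_nil]
  | succ k ih =>
    have h : (1 : Int) ≤ 1 + (k : Int) := by omega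
    have hcast : (1 : Int) + ((k + 1 : Nat) : Int) = (1 + (k : Int)) + 1 := by push_cast; ring
    rw [hcast, PySem.List.pyRange_one_succ_right h, List.foldl_append]
    simp only [List.foldl]
    push_cast
    nlinarith [ih]

-- ===== VERDICT (by name: the statement is the Claim_ definition above) =====
theorem shapeArea_spec : Claim_equal_shapeArea := by
  intro n _
  unfold Spec_shapeArea shapeArea shapeArea_alt
  by_cases h1 : n = 0 ∨ n < 0
  · rw [if_pos h1, if_pos (by omega : n ≤ 0)]
  · rw [if_neg h1, if_neg (by omega : ¬ n ≤ 0)]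
    by_cases h2 : n = 1
    · rw [if_pos h2]; subst h2; norm_num
    · rw [if_neg h2]
      have hm : n = 1 + ((n - 1).toNat : Int) := by omega
      have hs := pvSumRange (n - 1).toNat
      rw [← hm] at hs
      nlinarith [hs]
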